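-- pv_equiv track=rewrite | github.com/EimySenrioth/InfoAnalyzer-via-voz | il.py | contar_hermanos
-- ===== SOURCE A (Python) =====
-- def contar_hermanos(tuplas):
--     contador = 0
--     grupos_hermanos = {}
--
--     for tupla in tuplas:
--
--         apellido_paterno = tupla[2]
--         apellido_materno = tupla[3]
--         nombre_completo = tupla[1]
--
--         clave = (apellido_paterno, apellido_materno)
--
--         if clave not in grupos_hermanos:
--             grupos_hermanos[clave] = []
--
--         grupos_hermanos[clave].append(nombre_completo)
--
--     for grupo, nombres in grupos_hermanos.items():
--         if len(nombres) > 1: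
--             contador += len(nombres)
--
--     return contador
-- ===== SOURCE B (Python) =====
-- def contar_hermanos(tuplas):
--     claves = [(t[2], t[3]) for t in tuplas]
--     total = 0
--     while claves:
--         k = claves[0]
--         resto = [c for c in claves if c != k]
--         c = len(claves) - len(resto)
--         if c > 1:
--             total += c
--         claves = resto
--     return total
-- ===== Notes on version B (the rewrite author's own statement) =====
-- stated objective: alternative
-- what changed: B uses no dictionary at all: it projects the key list once, then iteratively peels off one surname-pair group per round by list filtering, measuring each group's size as the drop in list length, instead of A's hash-grouping of name lists followed by a size-summation pass.
import Mathlib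
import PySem

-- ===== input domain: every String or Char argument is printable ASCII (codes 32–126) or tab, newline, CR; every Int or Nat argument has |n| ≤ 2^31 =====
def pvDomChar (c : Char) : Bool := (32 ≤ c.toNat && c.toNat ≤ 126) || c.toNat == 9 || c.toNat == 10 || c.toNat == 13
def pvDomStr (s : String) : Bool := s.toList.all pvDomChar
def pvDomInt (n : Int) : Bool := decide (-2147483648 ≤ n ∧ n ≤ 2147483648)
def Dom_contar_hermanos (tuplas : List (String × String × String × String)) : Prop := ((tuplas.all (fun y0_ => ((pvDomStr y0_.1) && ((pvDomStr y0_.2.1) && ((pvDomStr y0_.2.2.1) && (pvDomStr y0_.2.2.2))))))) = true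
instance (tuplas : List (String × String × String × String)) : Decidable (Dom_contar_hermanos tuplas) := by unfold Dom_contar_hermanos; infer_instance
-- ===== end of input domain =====

-- B uses no dictionary: it peels off one surname-pair group per round by list filtering,
-- taking each group's size as the drop in list length (alternative decomposition, not faster).


-- ===== PORT A =====
def contar_hermanos (tuplas : List (String × String × String × String)) : Int :=
  let grupos := tuplas.foldl (fun d tupla =>
      let clave := (tupla.2.2.1, tupla.2.2.2)
      let d' := if d.contains clave then d else d.insert clave ([] : List String)
      d'.insert clave (d'.getD clave [] ++ [tupla.2.1]))
    PySem.Dict.empty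
  grupos.items.foldl (fun contador p =>
      if p.2.length > 1 then contador + (p.2.length : Int) else contador) 0

-- ===== PORT B =====
-- B's while-loop: peel off the first key's whole group by filtering, repeat on the remainder.
def pvPeel : List (String × String) → Int → Int
  | [], total => total
  | k :: t, total =>
    let resto := (k :: t).filter (fun c => !(c == k))
    let c : Int := ((k :: t).length : Int) - (resto.length : Int)
    pvPeel resto (if c > 1 then total + c else total)
termination_by claves _ => claves.length
decreasing_by
  simp only [List.filter_cons, beq_self_eq_true, Bool.not_true, List.length_cons]
  exact Nat.lt_succ_of_le (List.length_filter_le _ _)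

def contar_hermanos_alt (tuplas : List (String × String × String × String)) : Int :=
  pvPeel (tuplas.map (fun t => (t.2.2.1, t.2.2.2))) 0

-- ===== PRECONDITION & SPEC =====
def Spec_contar_hermanos (tuplas : List (String × String × String × String)) (out : Int) : Prop := out = contar_hermanos_alt tuplas
instance (tuplas : List (String × String × String × String)) (out : Int) : Decidable (Spec_contar_hermanos tuplas out) := by unfold Spec_contar_hermanos; infer_instance

-- ===== CLAIM (what is proved, stated in full; the proofs are below) =====
def Claim_equal_contar_hermanos : Prop := ∀ (tuplas : List (String × String × String × String)), Dom_contar_hermanos tuplas → Spec_contar_hermanos tuplas (contar_hermanos tuplas)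

-- ===== LEMMAS AND PROOFS =====

-- A's loop body (setdefault-then-append) is one dict.modify step
theorem pvStepA_eq_modify (d : PySem.Dict (String × String) (List String))
    (k : String × String) (n : String) :
    (let d' := if d.contains k then d else d.insert k ([] : List String)
     d'.insert k (d'.getD k [] ++ [n])) = d.modify k [] (· ++ [n]) := by
  by_cases h : d.contains k
  · simp [h, PySem.Dict.modify]
  · show (if d.contains k = true then d else d.insert k []).insert k
        ((if d.contains k = true then d else d.insert k []).getD k [] ++ [n]) = _
    rw [if_neg h, PySem.Dict.getD_insert_self, PySem.Dict.insert_insert_self]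
    show d.insert k ([] ++ [n]) = d.insert k (d.getD k [] ++ [n])
    rw [PySem.Dict.getD_of_not_contains d [] (by simpa using h)]

-- a sum-if fold equals init plus the sum of the guarded map
theorem pvFoldlIf {α : Type} (p : α → Prop) [DecidablePred p] (f : α → Int) :
    ∀ (l : List α) (init : Int),
      l.foldl (fun c x => if p x then c + f x else c) init
        = init + (l.map (fun x => if p x then f x else 0)).sum := by
  intro l
  induction l with
  | nil => simp
  | cons x t ih =>
    intro init
    simp only [List.foldl_cons, List.map_cons, List.sum_cons, ih]
    split <;> ring

-- filtering out the key removes exactly its occurrences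
theorem pvLenFilterNe {α : Type} [BEq α] [LawfulBEq α] (k : α) :
    ∀ l : List α, (l.filter (fun c => !(c == k))).length + l.count k = l.length := by
  intro l
  induction l with
  | nil => simp
  | cons x t ih =>
    by_cases h : x = k
    · subst h
      simp only [List.filter_cons, List.count_cons, List.length_cons, beq_self_eq_true,
        Bool.not_true, Bool.false_eq_true, if_false, if_true]
      omega
    · have hb : (x == k) = false := beq_eq_false_iff_ne.mpr h
      simp only [List.filter_cons, List.count_cons, List.length_cons, hb, Bool.not_false,
        if_true, Bool.false_eq_true, if_false]
      omega

-- counts of other elements survive the filtering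
theorem pvCountFilterNe {α : Type} [BEq α] [LawfulBEq α] (k j : α) (hj : j ≠ k) :
    ∀ l : List α, (l.filter (fun c => !(c == k))).count j = l.count j := by
  intro l
  induction l with
  | nil => simp
  | cons x t ih =>
    by_cases h : x = k
    · subst h
      have hx : (x == j) = false := beq_eq_false_iff_ne.mpr (Ne.symm hj)
      simp only [List.filter_cons, List.count_cons, beq_self_eq_true, Bool.not_true,
        Bool.false_eq_true, if_false, hx, ih, Nat.add_zero]
    · have hb : (x == k) = false := beq_eq_false_iff_ne.mpr h
      simp only [List.filter_cons, List.count_cons, hb, Bool.not_false, if_true, ih]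

-- B's peel loop computes the guarded group-size sum over the distinct keys
theorem pvPeel_eq (l : List (String × String)) (total : Int) :
    pvPeel l total
      = total + ((PySem.Set.ofList l).map
          (fun j => if l.count j > 1 then (l.count j : Int) else 0)).sum := by
  induction hn : l.length using Nat.strong_induction_on generalizing l total with
  | _ n ih =>
    match l with
    | [] => simp [pvPeel]
    | k :: t =>
      rw [pvPeel]
      simp only [List.filter_cons, beq_self_eq_true, Bool.not_true, Bool.false_eq_true, if_false]
      set r := t.filter (fun c => !(c == k)) with hrdef
      have hL : r.length + (k :: t).count k = (k :: t).length := by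
        have := pvLenFilterNe k (k :: t)
        simpa only [List.filter_cons, beq_self_eq_true, Bool.not_true, Bool.false_eq_true,
          if_false, ← hrdef] using this
      have hone : (k :: t).count k = t.count k + 1 := by
        simp
      have hlt : r.length < n := by
        subst hn
        simp only [List.length_cons] at hL ⊢
        omega
      have hc : ((k :: t).length : Int) - (r.length : Int) = ((k :: t).count k : Int) := by
        omega
      rw [hc, ih r.length hlt r _ rfl]
      have hcnt : ∀ j ∈ PySem.Set.ofList r,
          (if r.count j > 1 then (r.count j : Int) else 0)
            = (if (k :: t).count j > 1 then ((k :: t).count j : Int) else 0) := by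
        intro j hjmem
        have hj : j ≠ k := by
          rw [PySem.Set.mem_ofList, hrdef, List.mem_filter] at hjmem
          simpa using hjmem.2
        have h1 : r.count j = (k :: t).count j := by
          rw [hrdef]
          have := pvCountFilterNe k j hj (k :: t)
          simpa only [List.filter_cons, beq_self_eq_true, Bool.not_true, Bool.false_eq_true,
            if_false] using this
        rw [h1]
      rw [List.map_congr_left hcnt]
      have hperm : (PySem.Set.ofList (k :: t)).Perm (k :: PySem.Set.ofList r) := by
        refine (List.perm_ext_iff_of_nodup (PySem.Set.nodup_ofList _) ?_).mpr ?_
        · refine List.nodup_cons.mpr ⟨?_, PySem.Set.nodup_ofList _⟩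
          intro hkmem
          rw [PySem.Set.mem_ofList, hrdef, List.mem_filter] at hkmem
          simp at hkmem
        · intro a
          rw [PySem.Set.mem_ofList, List.mem_cons, List.mem_cons, PySem.Set.mem_ofList, hrdef,
            List.mem_filter]
          constructor
          · rintro (rfl | ha)
            · exact Or.inl rfl
            · by_cases hak : a = k
              · exact Or.inl hak
              · exact Or.inr ⟨ha, by simpa using hak⟩
          · rintro (rfl | ⟨ha, _⟩)
            · exact Or.inl rfl
            · exact Or.inr ha
      rw [(hperm.map (fun j => if (k :: t).count j > 1 then ((k :: t).count j : Int) else 0)).sum_eq]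
      simp only [List.map_cons, List.sum_cons]
      rcases Nat.lt_or_ge 1 ((k :: t).count k) with hgt | hle
      · have hgt' : ((k :: t).count k : Int) > 1 := by exact_mod_cast hgt
        rw [if_pos hgt', if_pos hgt]
        ring
      · have hle' : ¬ (((k :: t).count k : Int) > 1) := by
          simp only [not_lt]
          exact_mod_cast hle
        rw [if_neg hle', if_neg (by omega)]
        ring

-- the main equivalence
theorem contar_hermanos_eq (tuplas : List (String × String × String × String)) :
    contar_hermanos tuplas = contar_hermanos_alt tuplas := by
  classical
  set kf : (String × String × String × String) → String × String :=
    fun t => (t.2.2.1, t.2.2.2) with hkf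
  set klist := tuplas.map kf with hklist
  -- ----- A side: A = guarded sum over distinct keys -----
  have hdictA : tuplas.foldl (fun d tupla =>
      let clave := (tupla.2.2.1, tupla.2.2.2)
      let d' := if d.contains clave then d else d.insert clave ([] : List String)
      d'.insert clave (d'.getD clave [] ++ [tupla.2.1])) PySem.Dict.empty
      = tuplas.foldl (fun d tupla => d.modify (kf tupla) [] (· ++ [tupla.2.1])) PySem.Dict.empty := by
    have hfun : (fun (d : PySem.Dict (String × String) (List String)) tupla =>
        let clave := (tupla.2.2.1, tupla.2.2.2)
        let d' := if d.contains clave then d else d.insert clave ([] : List String)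
        d'.insert clave (d'.getD clave [] ++ [tupla.2.1]))
        = (fun d (tupla : String × String × String × String) =>
            d.modify (kf tupla) [] (· ++ [tupla.2.1])) := by
      funext d tupla
      exact pvStepA_eq_modify d (kf tupla) tupla.2.1
    rw [hfun]
  set pairs := tuplas.map (fun t => (kf t, t.2.1)) with hpairs
  have hdictA2 : tuplas.foldl (fun d tupla => d.modify (kf tupla) [] (· ++ [tupla.2.1])) PySem.Dict.empty
      = pairs.foldl (fun d p => d.modify p.1 [] (· ++ [p.2])) PySem.Dict.empty := by
    rw [hpairs, List.foldl_map]
  set gd := pairs.foldl (fun d p => d.modify p.1 [] (· ++ [p.2])) PySem.Dict.empty with hgd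
  have hkeysmap : pairs.map (·.1) = klist := by
    simp [hpairs, hklist, List.map_map, Function.comp_def]
  have hkeys : gd.keys = PySem.Set.ofList klist := by
    rw [hgd, PySem.Dict.keys_foldl_modify_key]
    simp only [PySem.Dict.keys_empty, hkeysmap]
    rfl
  have hnodup : gd.keys.Nodup := by rw [hkeys]; exact PySem.Set.nodup_ofList klist
  have hgetD : ∀ k, gd.getD k [] = (pairs.filter (fun p => p.1 == k)).map (·.2) := by
    intro k
    rw [hgd, PySem.Dict.getD_foldl_modify_append]
    simp
  have hlen : ∀ k, (gd.getD k []).length = klist.count k := by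
    intro k
    rw [hgetD, List.length_map, ← hkeysmap, List.count, List.countP_map,
      List.countP_eq_length_filter]
    rfl
  have hitems : gd.items = (PySem.Set.ofList klist).map (fun k => (k, gd.getD k [])) := by
    rw [← hkeys]; exact PySem.Dict.items_eq_map_keys gd hnodup []
  have hA : contar_hermanos tuplas
      = ((PySem.Set.ofList klist).map
          (fun k => if klist.count k > 1 then (klist.count k : Int) else 0)).sum := by
    show (tuplas.foldl _ PySem.Dict.empty).items.foldl _ 0 = _
    rw [hdictA, hdictA2, hitems,
      pvFoldlIf (fun p : (String × String) × List String => p.2.length > 1)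
        (fun p => (p.2.length : Int)), List.map_map]
    simp only [Function.comp_def, hlen, zero_add]
  -- ----- B side: the peel loop computes the same sum -----
  have hB : contar_hermanos_alt tuplas
      = ((PySem.Set.ofList klist).map
          (fun k => if klist.count k > 1 then (klist.count k : Int) else 0)).sum := by
    show pvPeel klist 0 = _
    rw [pvPeel_eq]
    ring
  rw [hA, hB]

-- ===== VERDICT (by name: the statement is the Claim_ definition above) =====
theorem contar_hermanos_spec : Claim_equal_contar_hermanos := by
  intro tuplas _
  exact contar_hermanos_eq tuplas
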